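-- pv_equiv track=rewrite | github.com/OpalinaK/Capstone-ML | sign_bounding.py | sign_bounding
-- ===== SOURCE A (Python) =====
-- def sign_bounding(boxes, frame_width, frame_height, left_expansion=200, right_expansion=400, top_expansion=100, bottom_expansion=300):
--     if not boxes:
--         return []
--
--     x1 = min(box[0] for box in boxes)
--     y1 = min(box[1] for box in boxes)
--     x2 = max(box[2] for box in boxes)
--     y2 = max(box[3] for box in boxes)
--
--     expanded_x1 = max(0, x1 - left_expansion)
--     expanded_y1 = max(0, y1 - top_expansion)
--     expanded_x2 = min(frame_width, x2 + right_expansion)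
--     expanded_y2 = min(frame_height, y2 + bottom_expansion)
--
--     return [(expanded_x1, expanded_y1, expanded_x2, expanded_y2)]
-- ===== SOURCE B (Python) =====
-- def sign_bounding(boxes, frame_width, frame_height, left_expansion=200, right_expansion=400, top_expansion=100, bottom_expansion=300):
--     if not boxes:
--         return []
--     # Clamp-then-union: expand and clamp every box individually, then take the
--     # union of the already-clamped boxes.  Correct because x -> max(0, x - e)
--     # and x -> min(f, x + e) are monotone, so they commute with min/max.
--     expanded = [(max(0, x1 - left_expansion),
--                  max(0, y1 - top_expansion),
--                  min(frame_width, x2 + right_expansion),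
--                  min(frame_height, y2 + bottom_expansion))
--                 for (x1, y1, x2, y2) in boxes]
--     xs1, ys1, xs2, ys2 = zip(*expanded)
--     return [(min(xs1), min(ys1), max(xs2), max(ys2))]
-- ===== Notes on version B (the rewrite author's own statement) =====
-- stated objective: alternative
-- what changed: A unions the raw boxes first and clamps/expands the single resulting box; B instead expands and clamps every box individually and then unions the already-clamped boxes (via zip transpose), relying on monotonicity of the clamping maps for correctness.
import Mathlib
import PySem

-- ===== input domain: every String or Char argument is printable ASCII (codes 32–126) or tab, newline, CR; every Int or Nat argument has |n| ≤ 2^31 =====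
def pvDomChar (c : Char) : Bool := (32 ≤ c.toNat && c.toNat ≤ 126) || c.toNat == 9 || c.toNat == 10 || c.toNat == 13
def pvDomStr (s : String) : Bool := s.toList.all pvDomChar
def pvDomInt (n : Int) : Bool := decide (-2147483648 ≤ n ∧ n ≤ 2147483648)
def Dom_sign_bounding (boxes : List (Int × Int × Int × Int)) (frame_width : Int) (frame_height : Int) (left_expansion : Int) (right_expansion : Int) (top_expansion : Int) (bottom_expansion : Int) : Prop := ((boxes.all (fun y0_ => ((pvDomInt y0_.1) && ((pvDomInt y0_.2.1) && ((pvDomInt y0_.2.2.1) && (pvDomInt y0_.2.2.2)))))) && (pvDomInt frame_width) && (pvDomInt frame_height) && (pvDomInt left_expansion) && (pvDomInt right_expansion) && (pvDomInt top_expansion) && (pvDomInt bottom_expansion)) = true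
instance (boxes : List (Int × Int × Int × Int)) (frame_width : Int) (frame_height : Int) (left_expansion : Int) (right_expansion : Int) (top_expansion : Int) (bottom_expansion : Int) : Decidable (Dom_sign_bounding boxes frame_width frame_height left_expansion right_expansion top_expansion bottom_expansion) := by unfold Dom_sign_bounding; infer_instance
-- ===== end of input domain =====

-- B reverses A's order of operations: it expands+clamps every box individually and
-- then unions the already-clamped boxes (transpose + min/max); same value because
-- the clamping maps are monotone. Objective: alternative decomposition, same cost.

-- ===== PORT A =====
-- A: guard on empty, then four min/max generator passes over the raw boxes,
-- then expand and clamp the single union box (Python min/max of a nonempty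
-- generator = PySem.List.min?/max? with identity key; getD's default is unused).
def sign_bounding (boxes : List (Int × Int × Int × Int)) (frame_width : Int) (frame_height : Int) (left_expansion : Int) (right_expansion : Int) (top_expansion : Int) (bottom_expansion : Int) : List (Int × Int × Int × Int) :=
  if boxes = [] then []
  else
    let x1 := (PySem.List.min? (boxes.map (fun box => box.1)) (fun y => y)).getD 0
    let y1 := (PySem.List.min? (boxes.map (fun box => box.2.1)) (fun y => y)).getD 0
    let x2 := (PySem.List.max? (boxes.map (fun box => box.2.2.1)) (fun y => y)).getD 0
    let y2 := (PySem.List.max? (boxes.map (fun box => box.2.2.2)) (fun y => y)).getD 0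
    let expanded_x1 := max 0 (x1 - left_expansion)
    let expanded_y1 := max 0 (y1 - top_expansion)
    let expanded_x2 := min frame_width (x2 + right_expansion)
    let expanded_y2 := min frame_height (y2 + bottom_expansion)
    [(expanded_x1, expanded_y1, expanded_x2, expanded_y2)]

-- ===== PORT B =====
-- B: build the list of per-box expanded+clamped boxes, then union them:
-- zip(*expanded) is the four projection maps, min/max as in Python.
def sign_bounding_alt (boxes : List (Int × Int × Int × Int)) (frame_width : Int) (frame_height : Int) (left_expansion : Int) (right_expansion : Int) (top_expansion : Int) (bottom_expansion : Int) : List (Int × Int × Int × Int) :=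
  if boxes = [] then []
  else
    let expanded := boxes.map (fun box =>
      (max 0 (box.1 - left_expansion),
       max 0 (box.2.1 - top_expansion),
       min frame_width (box.2.2.1 + right_expansion),
       min frame_height (box.2.2.2 + bottom_expansion)))
    let xs1 := expanded.map (fun e => e.1)
    let ys1 := expanded.map (fun e => e.2.1)
    let xs2 := expanded.map (fun e => e.2.2.1)
    let ys2 := expanded.map (fun e => e.2.2.2)
    [((PySem.List.min? xs1 (fun y => y)).getD 0,
      (PySem.List.min? ys1 (fun y => y)).getD 0,
      (PySem.List.max? xs2 (fun y => y)).getD 0,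
      (PySem.List.max? ys2 (fun y => y)).getD 0)]

-- ===== PRECONDITION & SPEC =====
def Spec_sign_bounding (boxes : List (Int × Int × Int × Int)) (frame_width : Int) (frame_height : Int) (left_expansion : Int) (right_expansion : Int) (top_expansion : Int) (bottom_expansion : Int) (out : List (Int × Int × Int × Int)) : Prop := out = sign_bounding_alt boxes frame_width frame_height left_expansion right_expansion top_expansion bottom_expansion
instance (boxes : List (Int × Int × Int × Int)) (frame_width : Int) (frame_height : Int) (left_expansion : Int) (right_expansion : Int) (top_expansion : Int) (bottom_expansion : Int) (out : List (Int × Int × Int × Int)) : Decidable (Spec_sign_bounding boxes frame_width frame_height left_expansion right_expansion top_expansion bottom_expansion out) := by unfold Spec_sign_bounding; infer_instance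

-- ===== CLAIM =====
def Claim_equal_sign_bounding : Prop := ∀ (boxes : List (Int × Int × Int × Int)) (frame_width : Int) (frame_height : Int) (left_expansion : Int) (right_expansion : Int) (top_expansion : Int) (bottom_expansion : Int), Dom_sign_bounding boxes frame_width frame_height left_expansion right_expansion top_expansion bottom_expansion → Spec_sign_bounding boxes frame_width frame_height left_expansion right_expansion top_expansion bottom_expansion (sign_bounding boxes frame_width frame_height left_expansion right_expansion top_expansion bottom_expansion)

-- ===== LEMMAS AND PROOFS =====

-- max 0 (· - e) is monotone, hence commutes with the running-min loop.
theorem foldl_min_clamp (l : List Int) (a e : Int) :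
    (l.map (fun x => max 0 (x - e))).foldl min (max 0 (a - e))
      = max 0 (l.foldl min a - e) := by
  induction l generalizing a with
  | nil => rfl
  | cons c t ih =>
    have h : min (max 0 (a - e)) (max 0 (c - e)) = max 0 (min a c - e) := by omega
    simp only [List.map, List.foldl, h, ih]

-- min f (· + e) is monotone, hence commutes with the running-max loop.
theorem foldl_max_clamp (l : List Int) (a e f : Int) :
    (l.map (fun x => min f (x + e))).foldl max (min f (a + e))
      = min f (l.foldl max a + e) := by
  induction l generalizing a with
  | nil => rfl
  | cons c t ih =>
    have h : max (min f (a + e)) (min f (c + e)) = min f (max a c + e) := by omega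
    simp only [List.map, List.foldl, h, ih]

-- ===== VERDICT =====
theorem sign_bounding_spec : Claim_equal_sign_bounding := by
  intro boxes fw fh le re te be _
  unfold Spec_sign_bounding sign_bounding sign_bounding_alt
  cases boxes with
  | nil => rfl
  | cons b rest =>
    simp only [List.map, PySem.List.min?_id_cons, PySem.List.max?_id_cons,
      Option.getD_some, List.map_map, Function.comp_def]
    have h1 := foldl_min_clamp (rest.map (fun box => box.1)) b.1 le
    have h2 := foldl_min_clamp (rest.map (fun box => box.2.1)) b.2.1 te
    have h3 := foldl_max_clamp (rest.map (fun box => box.2.2.1)) b.2.2.1 re fw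
    have h4 := foldl_max_clamp (rest.map (fun box => box.2.2.2)) b.2.2.2 be fh
    simp only [List.map_map, Function.comp_def] at h1 h2 h3 h4
    simp [h1, h2, h3, h4]
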